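-- pv_equiv track=rewrite | github.com/huggingface/text-embeddings-inference | backends/python/server/text_embeddings_server/models/xprovence_model.py | _extract_model_id
-- ===== SOURCE A (Python) =====
-- from typing import Type, List, Optional
--
-- def _extract_model_id(model_path_str: str) -> Optional[str]:
--     """Extract model_id from HF cache path format.
--
--     Converts paths like '/data/models--naver--xprovence-reranker-bgem3-v1/snapshots/...'
--     to 'naver/xprovence-reranker-bgem3-v1'
--     """
--     if "/models--" not in model_path_str:
--         return None
--
--     parts = model_path_str.split("/")
--     for part in parts:
--         if part.startswith("models--"):
--             # models--naver--xprovence-reranker-bgem3-v1 -> naver/xprovence-reranker-bgem3-v1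
--             return part.replace("models--", "").replace("--", "/", 1)
--     return None
-- ===== SOURCE B (Python) =====
-- from typing import Optional
--
--
-- def _extract_model_id(model_path_str: str) -> Optional[str]:
--     """Extract model_id from HF cache path format (index-scan re-implementation).
--
--     Instead of materialising a parts list, find the first '/'-component that
--     starts with 'models--' by raw index arithmetic and cut it out directly.
--     """
--     cut = model_path_str.find("/models--")
--     if cut == -1:
--         return None
--     # first component starting with 'models--': the whole-string prefix if the
--     # path itself begins with it, else the one right after the found slash
--     start = 0 if model_path_str.startswith("models--") else cut + 1
--     rest = model_path_str[start:]
--     j = rest.find("/")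
--     token = rest if j == -1 else rest[:j]
--     return token.replace("models--", "").replace("--", "/", 1)
-- ===== Notes on version B (the rewrite author's own statement) =====
-- stated objective: alternative
-- what changed: B drops A's split('/') parts list and loop entirely: it locates the '/models--' anchor with find, cuts the component out by index arithmetic (slice to the next '/'), and applies the same replace chain.
import Mathlib
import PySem

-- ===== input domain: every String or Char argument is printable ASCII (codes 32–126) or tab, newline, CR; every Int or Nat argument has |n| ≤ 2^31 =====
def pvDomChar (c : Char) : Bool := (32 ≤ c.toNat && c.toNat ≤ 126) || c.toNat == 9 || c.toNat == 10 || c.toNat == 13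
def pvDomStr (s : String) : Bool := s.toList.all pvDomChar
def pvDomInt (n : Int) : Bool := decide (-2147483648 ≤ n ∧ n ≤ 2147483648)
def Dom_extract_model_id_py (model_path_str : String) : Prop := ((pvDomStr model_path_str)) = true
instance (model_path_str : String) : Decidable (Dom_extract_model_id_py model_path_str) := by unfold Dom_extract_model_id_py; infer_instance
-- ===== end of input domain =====

-- B replaces A's split-into-parts-and-scan by direct index arithmetic on the raw
-- string (find the '/models--' anchor, cut the component out); same return value, no parts list.

-- shared model of Python's built-in str.replace(old, new, 1); exact for nonempty old
def pyReplace1 (s old new : List Char) : List Char :=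
  let i := PySem.Chars.find s old
  if i = -1 then s else s.take i.toNat ++ new ++ s.drop (i.toNat + old.length)

-- the common tail expression part.replace("models--", "").replace("--", "/", 1)
def pvFinish (t : List Char) : String :=
  String.ofList (pyReplace1 (PySem.Chars.replace t "models--".toList []) "--".toList "/".toList)

-- ===== PORT A =====
def extract_model_id_py_loop (parts : List (List Char)) : Option String :=
  match parts with
  | [] => none
  | p :: rest =>
    if PySem.Chars.startswith p "models--".toList then some (pvFinish p)
    else extract_model_id_py_loop rest

def extract_model_id_py (model_path_str : String) : Option String :=
  if PySem.Str.isIn "/models--" model_path_str = false then none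
  else extract_model_id_py_loop (PySem.Chars.splitOn model_path_str.toList "/".toList)

-- ===== PORT B =====
def extract_model_id_py_alt (model_path_str : String) : Option String :=
  let cut : Int := PySem.Str.find model_path_str "/models--"
  if cut = -1 then none
  else
    let start : Int := if PySem.Str.startswith model_path_str "models--" then 0 else cut + 1
    let rest : List Char := PySem.List.slice model_path_str.toList (some start) none
    let j : Int := PySem.Chars.find rest "/".toList
    let token : List Char := if j = -1 then rest else PySem.List.slice rest none (some j)
    some (pvFinish token)

-- ===== PRECONDITION & SPEC =====
def Spec_extract_model_id_py (model_path_str : String) (out : Option String) : Prop := out = extract_model_id_py_alt model_path_str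
instance (model_path_str : String) (out : Option String) : Decidable (Spec_extract_model_id_py model_path_str out) := by unfold Spec_extract_model_id_py; infer_instance

-- ===== CLAIM (what is proved, stated in full; the proofs are below) =====
def Claim_equal_extract_model_id_py : Prop := ∀ (model_path_str : String), Dom_extract_model_id_py model_path_str → Spec_extract_model_id_py model_path_str (extract_model_id_py model_path_str)

-- ===== LEMMAS AND PROOFS =====

-- the pattern 'models--', as an explicit character list
def pvPat : List Char := ['m','o','d','e','l','s','-','-']

-- structural shadow of PySem.Chars.splitOn for the single-char separator '/'
def pvSplit (cur : List Char) : List Char → List (List Char)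
  | [] => [cur.reverse]
  | c :: rest => if c = '/' then cur.reverse :: pvSplit [] rest else pvSplit (c :: cur) rest

-- the raw token B cuts out of the string, written over List Char
def pvTok (l : List Char) : List Char :=
  if pvPat <+: l then l.takeWhile (· ≠ '/')
  else (l.drop ((PySem.Chars.find l ('/' :: pvPat)).toNat + 1)).takeWhile (· ≠ '/')

theorem pvSplit_go (l : List Char) : ∀ (fuel : Nat) (cur : List Char) (acc : List (List Char)),
    l.length ≤ fuel →
    PySem.Chars.splitOn.go ['/'] fuel l cur acc = acc.reverse ++ pvSplit cur l := by
  induction l with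
  | nil =>
    intro fuel cur acc _
    cases fuel <;> simp [PySem.Chars.splitOn.go, pvSplit]
  | cons c rest ih =>
    intro fuel cur acc h
    cases fuel with
    | zero => simp at h
    | succ f =>
      simp only [PySem.Chars.splitOn.go]
      by_cases hc : c = '/'
      · subst hc
        have hpre : List.isPrefixOf ['/'] ('/' :: rest) = true := by simp [List.isPrefixOf]
        simp only [hpre, if_pos]
        rw [show List.drop (List.length ['/']) ('/' :: rest) = rest by simp]
        rw [ih f [] (cur.reverse :: acc) (by simpa using Nat.lt_succ_iff.mp (by simpa using h))]
        simp [pvSplit]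
      · have hpre : List.isPrefixOf ['/'] (c :: rest) = false := by
          simp [List.isPrefixOf]
          exact fun h => absurd h.symm hc
        simp only [hpre]
        rw [ih f (c :: cur) acc (by simpa using Nat.lt_succ_iff.mp (by simpa using h))]
        simp [pvSplit, hc]

theorem splitOn_eq_pvSplit (l : List Char) :
    PySem.Chars.splitOn l "/".toList = pvSplit [] l := by
  show PySem.Chars.splitOn.go ['/'] (l.length + 1) l [] [] = _
  rw [pvSplit_go l (l.length + 1) [] [] (by omega)]
  simp

theorem singleton_prefix_iff (c : Char) (l : List Char) : [c] <+: l ↔ l.head? = some c := by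
  cases l with
  | nil => simp
  | cons a t =>
    simp [List.cons_prefix_cons, List.nil_prefix]
    constructor <;> (intro h; exact h.symm)

-- PySem.Chars.find at a nailed-down first occurrence
theorem find_eq_of (l sub : List Char) (n : Nat)
    (h1 : sub <+: l.drop n) (h2 : ∀ i, i < n → ¬ sub <+: l.drop i) :
    PySem.Chars.find l sub = n := by
  have hin : PySem.Chars.isIn sub l = true :=
    (PySem.Chars.exists_prefix_drop_iff_isIn sub l).mp ⟨n, h1⟩
  have hnn : 0 ≤ PySem.Chars.find l sub :=
    (PySem.Chars.find_nonneg_iff l sub).mpr ((PySem.Chars.isIn_iff_infix sub l).mp hin)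
  obtain ⟨hp, hmin⟩ := PySem.Chars.find_spec hnn
  have : (PySem.Chars.find l sub).toNat = n := by
    rcases Nat.lt_trichotomy (PySem.Chars.find l sub).toNat n with h | h | h
    · exact absurd hp (h2 _ h)
    · exact h
    · exact absurd h1 (hmin n h)
  omega

theorem takeWhile_eq_take_of (l : List Char) (c : Char) : ∀ (n : Nat),
    l[n]? = some c → (∀ i, i < n → l[i]? ≠ some c) →
    l.takeWhile (· ≠ c) = l.take n := by
  induction l with
  | nil => intro n h _; simp at h
  | cons a t ih =>
    intro n h hlt
    cases n with
    | zero =>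
      simp at h
      subst h
      simp
    | succ m =>
      have ha : a ≠ c := by
        intro he
        exact hlt 0 (by omega) (by simp [he])
      rw [List.takeWhile_cons_of_pos (by simp [ha]), List.take_succ_cons]
      exact congrArg (a :: ·) <| ih m (by simpa using h) (fun i hi => by
        have := hlt (i + 1) (by omega)
        simpa using this)

-- cutting a list at its first '/' is takeWhile
theorem cut_at_slash (l : List Char) :
    (if PySem.Chars.find l ['/'] = -1 then l
     else l.take (PySem.Chars.find l ['/']).toNat) = l.takeWhile (· ≠ '/') := by
  by_cases h : PySem.Chars.find l ['/'] = -1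
  · rw [if_pos h]
    have hni : ¬ (['/'] <:+: l) := (PySem.Chars.find_eq_neg_one_iff l ['/']).mp h
    have hmem : '/' ∉ l := by
      intro hm
      obtain ⟨a, b, hab⟩ := List.append_of_mem hm
      exact hni ⟨a, b, by simp [hab]⟩
    symm
    rw [List.takeWhile_eq_self_iff]
    intro a ha
    simpa using fun he : a = '/' => hmem (he ▸ ha)
  · rw [if_neg h]
    have hnn : 0 ≤ PySem.Chars.find l ['/'] := by
      have := PySem.Chars.neg_one_le_find l ['/']
      omega
    obtain ⟨hp, hmin⟩ := PySem.Chars.find_spec hnn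
    set n := (PySem.Chars.find l ['/']).toNat with hn
    have hg : l[n]? = some '/' := by
      rw [← List.head?_drop]
      exact (singleton_prefix_iff _ _).mp hp
    symm
    exact takeWhile_eq_take_of l '/' n hg (fun i hi hic =>
      hmin i hi ((singleton_prefix_iff _ _).mpr (by rw [List.head?_drop]; exact hic)))

-- A's loop is find? composed with the common finishing expression
theorem loop_eq_find? (ps : List (List Char)) :
    extract_model_id_py_loop ps = (ps.find? (fun p => pvPat.isPrefixOf p)).map pvFinish := by
  induction ps with
  | nil => rfl
  | cons p rest ih =>
    show (if PySem.Chars.startswith p "models--".toList then some (pvFinish p)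
          else extract_model_id_py_loop rest) = _
    rw [show PySem.Chars.startswith p "models--".toList = pvPat.isPrefixOf p from rfl]
    by_cases hm : pvPat.isPrefixOf p
    · rw [if_pos hm, List.find?_cons_of_pos hm]
      rfl
    · rw [if_neg (by simpa using hm), List.find?_cons_of_neg (by simpa using hm), ih]

theorem pvSplit_no_slash (l : List Char) : ∀ (cur : List Char), '/' ∉ l →
    pvSplit cur l = [cur.reverse ++ l] := by
  induction l with
  | nil => intro cur _; simp [pvSplit]
  | cons a t ih =>
    intro cur h
    have ha : a ≠ '/' := fun he => h (he ▸ List.mem_cons_self)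
    simp only [pvSplit, if_neg ha]
    rw [ih (a :: cur) (fun hm => h (List.mem_cons_of_mem a hm))]
    simp

theorem pvSplit_break (p : List Char) : ∀ (cur l' : List Char), '/' ∉ p →
    pvSplit cur (p ++ '/' :: l') = (cur.reverse ++ p) :: pvSplit [] l' := by
  induction p with
  | nil => intro cur l' _; simp [pvSplit]
  | cons a t ih =>
    intro cur l' h
    have ha : a ≠ '/' := fun he => h (he ▸ List.mem_cons_self)
    simp only [List.cons_append, pvSplit, if_neg ha]
    rw [ih (a :: cur) l' (fun hm => h (List.mem_cons_of_mem a hm))]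
    simp

theorem prefix_takeWhile (p : List Char) (ch : Char) : ∀ (l : List Char), p <+: l →
    (∀ c ∈ p, c ≠ ch) → p <+: l.takeWhile (· ≠ ch) := by
  induction p with
  | nil => intro l _ _; exact List.nil_prefix
  | cons a t ih =>
    intro l hp hc
    cases l with
    | nil => simp at hp
    | cons b u =>
      rw [List.cons_prefix_cons] at hp
      obtain ⟨rfl, htu⟩ := hp
      rw [List.takeWhile_cons_of_pos (by simp [hc a List.mem_cons_self])]
      rw [List.cons_prefix_cons]
      exact ⟨rfl, ih u htu (fun c hm => hc c (List.mem_cons_of_mem a hm))⟩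

-- splitting off the first component
theorem decomp (l : List Char) (h : '/' ∈ l) :
    l = l.takeWhile (· ≠ '/') ++ '/' :: (l.drop ((l.takeWhile (· ≠ '/')).length + 1)) := by
  induction l with
  | nil => simp at h
  | cons a t ih =>
    by_cases ha : a = '/'
    · subst ha; simp
    · rw [List.takeWhile_cons_of_pos (by simp [ha])]
      have ht : '/' ∈ t := by
        rcases List.mem_cons.mp h with h' | h'
        · exact absurd h'.symm ha
        · exact h'
      simp only [List.length_cons, List.cons_append, List.drop_succ_cons]
      exact congrArg (a :: ·) (ih ht)

theorem pat_no_slash : ∀ c ∈ pvPat, c ≠ '/' := by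
  intro c hc
  fin_cases hc <;> decide

-- the crux: the first '/'-component starting with the pattern is exactly the token
-- B cuts out by index arithmetic
theorem pvMainN : ∀ (N : Nat) (l : List Char), l.length ≤ N →
    (pvPat <+: l ∨ ('/' :: pvPat) <:+: l) →
    (pvSplit [] l).find? (fun p => pvPat.isPrefixOf p) = some (pvTok l) := by
  intro N
  induction N with
  | zero =>
    intro l hl h
    have hnil : l = [] := List.length_eq_zero_iff.mp (Nat.le_zero.mp hl)
    subst hnil
    rcases h with h | h
    · exact absurd (List.prefix_nil.mp h) (by decide)
    · exact absurd (List.infix_nil.mp h) (by decide)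
  | succ N ih =>
    intro l hl h
    set tw := l.takeWhile (· ≠ '/') with htw
    have hnp : '/' ∉ tw := fun hm => by simpa using List.mem_takeWhile_imp hm
    have hslash : pvPat <+: l ∨ '/' ∈ l := by
      rcases h with h | h
      · exact Or.inl h
      · obtain ⟨pre, post, rfl⟩ := h
        exact Or.inr (by simp)
    by_cases hp : pvPat <+: l
    · -- the very first component starts with the pattern
      have hmatch : pvPat.isPrefixOf tw = true := by
        rw [List.isPrefixOf_iff_prefix]
        exact prefix_takeWhile pvPat '/' l hp pat_no_slash
      have htokl : pvTok l = tw := by rw [pvTok, if_pos hp]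
      rw [htokl]
      by_cases hs : '/' ∈ l
      · conv_lhs => rw [decomp l hs]
        rw [pvSplit_break tw [] _ hnp]
        simp only [List.reverse_nil, List.nil_append]
        rw [List.find?_cons_of_pos hmatch]
      · rw [pvSplit_no_slash l [] hs]
        have hml : pvPat.isPrefixOf l = true := List.isPrefixOf_iff_prefix.mpr hp
        simp only [List.reverse_nil, List.nil_append]
        rw [List.find?_cons_of_pos hml]
        have : l.takeWhile (· ≠ '/') = l := by
          rw [List.takeWhile_eq_self_iff]
          intro a ha
          simpa using fun he : a = '/' => hs (he ▸ ha)
        rw [htw, this]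
    · have hs : '/' ∈ l := by
        rcases hslash with h' | h'
        · exact absurd h' hp
        · exact h'
      have hdec := decomp l hs
      set l' := l.drop (tw.length + 1) with hl'
      have hnm : pvPat.isPrefixOf tw = false := by
        rw [Bool.eq_false_iff]
        intro hc
        rw [List.isPrefixOf_iff_prefix] at hc
        exact hp (hc.trans ⟨'/' :: l', hdec.symm⟩)
      have hlow : ∀ i, i < tw.length → ¬ ('/' :: pvPat) <+: l.drop i := by
        intro i hi hc
        have hhead : l[i]? = some '/' := by
          rw [← List.head?_drop]
          rcases hc with ⟨t, ht⟩
          rw [← ht]; rfl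
        have heq : l[i]? = tw[i]? := by
          conv_lhs => rw [hdec]
          exact List.getElem?_append_left hi
        rw [heq, List.getElem?_eq_getElem hi] at hhead
        have hmemtw : tw[i] ∈ List.takeWhile (fun x => decide (x ≠ '/')) l := by
          rw [← htw]; exact List.getElem_mem hi
        have hmem := List.mem_takeWhile_imp hmemtw
        rw [Option.some_inj.mp hhead] at hmem
        simp at hmem
      have hdrop : l.drop (tw.length + 1) = l' := rfl
      have hdropk : ∀ k : Nat, l.drop (tw.length + 1 + k) = l'.drop k := by
        intro k
        rw [hl', List.drop_drop]
      have hdrop_tw : l.drop tw.length = '/' :: l' := by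
        conv_lhs => rw [hdec]
        rw [← htw, List.drop_left]
      have hlen' : l'.length ≤ N := by
        have hlc := congrArg List.length hdec
        rw [← htw] at hlc
        simp at hlc
        omega
      have hh' : pvPat <+: l' ∨ ('/' :: pvPat) <:+: l' := by
        rcases h with h' | h'
        · exact absurd h' hp
        · have hin : PySem.Chars.isIn ('/' :: pvPat) l = true :=
            (PySem.Chars.isIn_iff_infix _ _).mpr h'
          obtain ⟨j, hj⟩ := (PySem.Chars.exists_prefix_drop_iff_isIn _ _).mpr hin
          rcases Nat.lt_trichotomy j tw.length with hlt | heq | hgt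
          · exact absurd hj (hlow j hlt)
          · subst heq
            rw [hdrop_tw, List.cons_prefix_cons] at hj
            exact Or.inl hj.2
          · right
            obtain ⟨k, hk⟩ : ∃ k, j = tw.length + 1 + k := ⟨j - tw.length - 1, by omega⟩
            subst hk
            rw [hdropk k] at hj
            obtain ⟨t, ht⟩ := hj
            obtain ⟨s, hst⟩ := List.drop_suffix k l'
            exact ⟨s, t, by rw [← hst, ← ht]; simp⟩
      have hih := ih l' hlen' hh'
      have hA : (pvSplit [] l).find? (fun p => pvPat.isPrefixOf p)
          = (pvSplit [] l').find? (fun p => pvPat.isPrefixOf p) := by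
        conv_lhs => rw [hdec]
        rw [pvSplit_break tw [] _ hnp]
        simp only [List.reverse_nil, List.nil_append]
        rw [List.find?_cons_of_neg (by simp [hnm])]
      have htok : pvTok l' = pvTok l := by
        by_cases hp' : pvPat <+: l'
        · have hfind : PySem.Chars.find l ('/' :: pvPat) = (tw.length : Nat) := by
            apply find_eq_of
            · rw [hdrop_tw, List.cons_prefix_cons]
              exact ⟨rfl, hp'⟩
            · exact hlow
          rw [pvTok, if_pos hp', pvTok, if_neg hp, hfind]
          simp only [Int.toNat_natCast]
          rw [hdrop]
        · have hinf' : ('/' :: pvPat) <:+: l' := by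
            rcases hh' with h' | h'
            · exact absurd h' hp'
            · exact h'
          have hnn' : 0 ≤ PySem.Chars.find l' ('/' :: pvPat) :=
            (PySem.Chars.find_nonneg_iff _ _).mpr hinf'
          obtain ⟨hp2, hmin2⟩ := PySem.Chars.find_spec hnn'
          set m := (PySem.Chars.find l' ('/' :: pvPat)).toNat with hm
          have hfind : PySem.Chars.find l ('/' :: pvPat) = ((tw.length + 1 + m : Nat) : Int) := by
            apply find_eq_of
            · rw [hdropk m]
              exact hp2
            · intro i hi hc
              rcases Nat.lt_trichotomy i tw.length with hlt | heq | hgt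
              · exact hlow i hlt hc
              · subst heq
                rw [hdrop_tw, List.cons_prefix_cons] at hc
                exact hp' hc.2
              · obtain ⟨k, hk⟩ : ∃ k, i = tw.length + 1 + k := ⟨i - tw.length - 1, by omega⟩
                subst hk
                rw [hdropk k] at hc
                exact hmin2 k (by omega) hc
          rw [pvTok, if_neg hp', pvTok, if_neg hp, hfind]
          simp only [Int.toNat_natCast]
          have harr : tw.length + 1 + m + 1 = tw.length + 1 + (m + 1) := by omega
          rw [harr, hdropk (m + 1), hm]
      rw [hA, hih, htok]

-- cutting B's rest list at its first '/' is takeWhile, in the shape B computes it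
theorem token_eq_takeWhile (r : List Char) :
    (if PySem.Chars.find r "/".toList = -1 then r
     else PySem.List.slice r none (some (PySem.Chars.find r "/".toList)))
    = r.takeWhile (· ≠ '/') := by
  have hsub : ("/".toList : List Char) = ['/'] := rfl
  rw [hsub]
  by_cases hj : PySem.Chars.find r ['/'] = -1
  · rw [if_pos hj, ← cut_at_slash r, if_pos hj]
  · have hnn : 0 ≤ PySem.Chars.find r ['/'] := by
      have := PySem.Chars.neg_one_le_find r ['/']
      omega
    rw [if_neg hj, PySem.List.slice_to r hnn, ← cut_at_slash r, if_neg hj]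

-- B's computation equals the abstract token when the anchor is present
theorem alt_token_eq (s : String) (hinf : ('/' :: pvPat) <:+: s.toList) :
    extract_model_id_py_alt s = some (pvFinish (pvTok s.toList)) := by
  have hfind : PySem.Str.find s "/models--" = PySem.Chars.find s.toList ('/' :: pvPat) := rfl
  have hnn : 0 ≤ PySem.Chars.find s.toList ('/' :: pvPat) :=
    (PySem.Chars.find_nonneg_iff _ _).mpr hinf
  simp only [extract_model_id_py_alt, hfind]
  rw [if_neg (by omega)]
  by_cases hsw : PySem.Str.startswith s "models--" = true
  · have hpre : pvPat <+: s.toList := by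
      have : ("models--".toList).isPrefixOf s.toList = true := hsw
      exact List.isPrefixOf_iff_prefix.mp this
    rw [if_pos hsw, PySem.List.slice_zero_start, PySem.List.slice_none_none]
    rw [token_eq_takeWhile s.toList]
    rw [pvTok, if_pos hpre]
  · have hpre : ¬ pvPat <+: s.toList := by
      intro hc
      exact hsw (by
        show ("models--".toList).isPrefixOf s.toList = true
        exact List.isPrefixOf_iff_prefix.mpr hc)
    rw [if_neg hsw]
    rw [PySem.List.slice_from s.toList (by omega)]
    have htn : (PySem.Chars.find s.toList ('/' :: pvPat) + 1).toNat
        = (PySem.Chars.find s.toList ('/' :: pvPat)).toNat + 1 := by omega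
    rw [htn, token_eq_takeWhile]
    rw [pvTok, if_neg hpre]

-- ===== VERDICT (by name: the statement is the Claim_ definition above) =====
theorem extract_model_id_py_spec : Claim_equal_extract_model_id_py := by
  intro s _
  show extract_model_id_py s = extract_model_id_py_alt s
  by_cases hin : PySem.Str.isIn "/models--" s = false
  · rw [extract_model_id_py, if_pos hin]
    have hni : ¬ ('/' :: pvPat) <:+: s.toList := by
      have h := (PySem.Chars.isIn_eq_false_iff "/models--".toList s.toList).mp hin
      simpa using h
    have hf : PySem.Str.find s "/models--" = -1 :=
      (PySem.Chars.find_eq_neg_one_iff s.toList ('/' :: pvPat)).mpr hni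
    simp only [extract_model_id_py_alt]
    rw [if_pos hf]
  · have htrue : PySem.Str.isIn "/models--" s = true := by
      revert hin
      cases PySem.Str.isIn "/models--" s <;> simp
    have hinf : ('/' :: pvPat) <:+: s.toList := by
      have h := (PySem.Chars.isIn_iff_infix "/models--".toList s.toList).mp htrue
      simpa using h
    rw [extract_model_id_py, if_neg hin, splitOn_eq_pvSplit, loop_eq_find?,
        pvMainN s.toList.length s.toList le_rfl (Or.inr hinf), alt_token_eq s hinf]
    rfl
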